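-- pv_equiv track=rewrite | github.com/zachpinto/project-euler | 71-80/problem_77.py | count_prime_summations
-- ===== SOURCE A (Python) =====
-- from math import isqrt
--
-- def sieve_of_eratosthenes(limit):
--     primes = [True] * (limit + 1)
--     primes[0] = primes[1] = False
--
--     for i in range(2, isqrt(limit) + 1):
--         if primes[i]:
--             for j in range(i * i, limit + 1, i):
--                 primes[j] = False
--
--     return [i for i, prime in enumerate(primes) if prime]
--
-- def count_prime_summations(limit):
--     primes = sieve_of_eratosthenes(limit)
--     ways = [0] * (limit + 1)
--     ways[0] = 1
--
--     for prime in primes: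
--         for i in range(prime, limit + 1):
--             ways[i] += ways[i - prime]
--
--     for i, ways_count in enumerate(ways):
--         if ways_count > 5000:
--             return i
-- ===== SOURCE B (Python) =====
-- from math import isqrt
--
-- def sieve_of_eratosthenes(limit):
--     primes = [True] * (limit + 1)
--     primes[0] = primes[1] = False
--
--     for i in range(2, isqrt(limit) + 1):
--         if primes[i]:
--             for j in range(i * i, limit + 1, i):
--                 primes[j] = False
--
--     return [i for i, prime in enumerate(primes) if prime]
--
-- def count_prime_summations(limit):
--     primes = sieve_of_eratosthenes(limit)
--     memo = {}
--
--     def count(target, idx):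
--         # ways to write target as a sum of primes[idx:] (take-or-skip on idx)
--         if target == 0:
--             return 1
--         if idx == len(primes) or primes[idx] > target:
--             return 0  # primes are sorted, so nothing from idx on fits
--         key = (target, idx)
--         if key not in memo:
--             memo[key] = count(target - primes[idx], idx) + count(target, idx + 1)
--         return memo[key]
--
--     for i in range(limit + 1):
--         if count(i, 0) > 5000:
--             return i
-- ===== Notes on version B (the rewrite author's own statement) =====
-- stated objective: faster
-- what changed: Replaces the bottom-up ways[] array swept over every prime with a memoized top-down recursion count(target, idx) over the prime index (take-or-skip, with a sorted-primes cutoff), searching i upward and only ever evaluating the counts the search actually needs.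
import Mathlib
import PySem

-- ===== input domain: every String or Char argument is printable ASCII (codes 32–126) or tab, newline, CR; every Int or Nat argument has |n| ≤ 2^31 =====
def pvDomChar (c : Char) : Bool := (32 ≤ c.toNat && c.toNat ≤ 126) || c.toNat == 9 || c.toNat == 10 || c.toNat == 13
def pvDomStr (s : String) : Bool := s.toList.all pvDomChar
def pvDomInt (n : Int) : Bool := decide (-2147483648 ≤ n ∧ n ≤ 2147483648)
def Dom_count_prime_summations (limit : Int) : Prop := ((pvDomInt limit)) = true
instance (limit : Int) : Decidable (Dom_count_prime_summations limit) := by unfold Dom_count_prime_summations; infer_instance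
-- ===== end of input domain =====

-- B replaces A's full bottom-up ways[] sweep over every prime by a top-down take-or-skip
-- recursion over the prime index, evaluated only at the targets the upward search reaches.

-- ===== PORT A =====
-- shared helper: both Pythons contain the identical sieve, so both ports call this one port of it.
-- Python lists used as flat tables are ported as Array; isqrt(limit) is ported as
-- Nat.sqrt limit.toNat — exact for limit ≥ 0 (Python raises on limit < 0, outside Pre_);
-- primes[i] reads / primes[j] writes are ported with Array.getD / Array.setIfInBounds at the
-- nonnegative index — exact because under Pre_ every index used is in range.
def sieve_of_eratosthenes (limit : Int) : List Int :=
  let primes0 : Array Bool := Array.replicate (limit + 1).toNat true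
  let primes1 := primes0.setIfInBounds 0 false
  let primes2 := primes1.setIfInBounds 1 false
  let primes3 :=
    (PySem.List.pyRange 2 (((Nat.sqrt limit.toNat : Nat) : Int) + 1) 1).foldl
      (fun pr i =>
        if pr.getD i.toNat false then
          (PySem.List.pyRange (i * i) (limit + 1) i).foldl
            (fun pr2 j => pr2.setIfInBounds j.toNat false) pr
        else pr) primes2
  (PySem.List.enumerate primes3.toList).filterMap (fun q => if q.2 then some q.1 else none)

def count_prime_summations (limit : Int) : Option Int :=
  let primes := sieve_of_eratosthenes limit
  let ways0 : Array Int := Array.replicate (limit + 1).toNat 0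
  let ways1 := ways0.setIfInBounds 0 1
  let ways2 := primes.foldl (fun w p =>
      (PySem.List.pyRange p (limit + 1) 1).foldl (fun w2 i =>
        w2.setIfInBounds i.toNat (w2.getD i.toNat 0 + w2.getD (i - p).toNat 0)) w) ways1
  ((PySem.List.enumerate ways2.toList).find? (fun ic => decide (5000 < ic.2))).map (fun ic => ic.1)

-- ===== PORT B =====
-- lemmas the port of B needs (cited in countB's hp argument): a write of `false` into a
-- boolean table can only turn entries false, hence the sieve lists only indices ≥ 2.
theorem arr_getD_eq {α : Type} (a : Array α) (i : Nat) (d : α) : a.getD i d = a[i]?.getD d := by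
  simp [Array.getD]
  split <;> simp_all

theorem pv_set_false_true {a : Array Bool} {m k : Nat}
    (h : ((a.setIfInBounds m false)).getD k false = true) : a.getD k false = true := by
  rw [arr_getD_eq, Array.getElem?_setIfInBounds] at h
  rw [arr_getD_eq]
  split at h
  · split at h <;> simp_all
  · exact h

theorem pv_inner_false_true (rng : List Int) :
    ∀ (a : Array Bool) (k : Nat),
      ((rng.foldl (fun p2 j => p2.setIfInBounds j.toNat false) a).getD k false = true) →
      a.getD k false = true := by
  induction rng with
  | nil => intro a k h; simpa using h
  | cons j rest ih =>
      intro a k h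
      exact pv_set_false_true (ih _ k h)

theorem pv_outer_false_true (rng : List Int) (b : Int) :
    ∀ (a : Array Bool) (k : Nat),
      ((rng.foldl (fun pr i =>
          if pr.getD i.toNat false then
            (PySem.List.pyRange (i * i) b i).foldl
              (fun pr2 j => pr2.setIfInBounds j.toNat false) pr
          else pr) a).getD k false = true) →
      a.getD k false = true := by
  induction rng with
  | nil => intro a k h; simpa using h
  | cons i rest ih =>
      intro a k h
      have h' := ih _ k h
      by_cases hc : a.getD i.toNat false
      · simp only [hc, if_true] at h'
        exact pv_inner_false_true _ _ k h'
      · simpa [hc] using h'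

theorem pv_table_true {X : Array Bool} {k : Nat} (hk : k < X.toList.length)
    (h2 : X.toList[k] = true) : X.getD k false = true := by
  rw [Array.length_toList] at hk
  rw [Array.getElem_toList hk] at h2
  rw [arr_getD_eq, Array.getElem?_eq_getElem hk]
  simpa using h2

theorem pv_init_ge_two {n k : Nat}
    (h : (((Array.replicate n true).setIfInBounds 0 false).setIfInBounds 1
      false).getD k false = true) : 2 ≤ k := by
  rw [arr_getD_eq, Array.getElem?_setIfInBounds, Array.getElem?_setIfInBounds] at h
  by_cases hk1 : k = 1
  · rw [if_pos (by omega : 1 = k)] at h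
    split at h <;> simp_all
  by_cases hk0 : k = 0
  · rw [if_neg (by omega : ¬1 = k), if_pos (by omega : 0 = k)] at h
    split at h <;> simp_all
  · omega

theorem sieve_ge_two (limit : Int) : ∀ p ∈ sieve_of_eratosthenes limit, 2 ≤ p := by
  intro p hp
  unfold sieve_of_eratosthenes at hp
  obtain ⟨q, hqmem, hq⟩ := List.mem_filterMap.mp hp
  by_cases h2 : q.2
  case neg => rw [if_neg h2] at hq; cases hq
  rw [if_pos h2] at hq
  obtain rfl : q.1 = p := Option.some.inj hq
  rw [PySem.List.mem_enumerate_iff] at hqmem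
  obtain ⟨k, hk, hqe⟩ := hqmem
  subst hqe
  simp only at h2 ⊢
  have h3 := pv_table_true hk h2
  have h4 := pv_outer_false_true _ _ _ k h3
  have h5 := pv_init_ge_two h4
  omega

-- count of ways to write t as a sum drawn from ps (take-or-skip on the head); the
-- positivity hypothesis (discharged by sieve_ge_two) is what makes the take branch
-- terminate, exactly as Source B's memoized count(target, idx) over primes[idx:].
def countB : (ps : List Int) → (∀ p ∈ ps, 2 ≤ p) → Int → Int
  | ps, hp, t =>
    if _ht : t = 0 then 1
    else
      match ps, hp with
      | [], _ => 0
      | p :: rest, hp =>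
        if _hpt : t < p then 0
        else countB (p :: rest) hp (t - p) +
             countB rest (fun q hq => hp q (List.mem_cons_of_mem p hq)) t
termination_by ps _ t => (t.toNat, ps.length)
decreasing_by
  · have h2 : 2 ≤ p := hp p (List.mem_cons_self ..)
    exact Prod.Lex.left _ _ (by omega)
  · exact Prod.Lex.right _ (by simp)

def count_prime_summations_alt (limit : Int) : Option Int :=
  let primes := sieve_of_eratosthenes limit
  (PySem.List.pyRange 0 (limit + 1) 1).find?
    (fun i => decide (5000 < countB primes (sieve_ge_two limit) i))

-- ===== PRECONDITION & SPEC =====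
-- Pre_ excludes limit ≤ 0, on which A raises (IndexError from primes[1] on a list of
-- length ≤ 1, or ValueError from isqrt of a negative number).
def Pre_count_prime_summations (limit : Int) : Prop := 1 ≤ limit
instance (limit : Int) : Decidable (Pre_count_prime_summations limit) := by
  unfold Pre_count_prime_summations; infer_instance
def pvWitness_count_prime_summations : Int := (10)

def Spec_count_prime_summations (limit : Int) (out : Option Int) : Prop :=
  out = count_prime_summations_alt limit
instance (limit : Int) (out : Option Int) : Decidable (Spec_count_prime_summations limit out) := by
  unfold Spec_count_prime_summations; infer_instance

-- ===== CLAIM (what is proved, stated in full; the proofs are below) =====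
def Claim_equal_count_prime_summations : Prop :=
  ∀ (limit : Int), Dom_count_prime_summations limit → Pre_count_prime_summations limit →
    Spec_count_prime_summations limit (count_prime_summations limit)

-- ===== LEMMAS AND PROOFS =====

-- reference count: Nways ps t = number of multisets of elements of ps summing to t
def Nways : (ps : List Int) → Int → Int
  | [], t => if t = 0 then 1 else 0
  | p :: ps, t =>
      Nways ps t + (if _h : 0 < p ∧ p ≤ t then Nways (p :: ps) (t - p) else 0)
termination_by ps t => (t.toNat, (ps.length))
decreasing_by
  · exact Prod.Lex.right _ (by simp)
  · exact Prod.Lex.left _ _ (by omega)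

theorem Nways_nil (t : Int) : Nways [] t = if t = 0 then 1 else 0 := by
  rw [Nways]

theorem Nways_cons (p : Int) (ps : List Int) (t : Int) :
    Nways (p :: ps) t = Nways ps t + (if 0 < p ∧ p ≤ t then Nways (p :: ps) (t - p) else 0) := by
  rw [Nways]
  by_cases hc : (0 : Int) < p ∧ p ≤ t
  · rw [dif_pos hc, if_pos hc]
  · rw [dif_neg hc, if_neg hc]

theorem Nways_cons_pos {p : Int} {ps : List Int} {t : Int} (hc : 0 < p ∧ p ≤ t) :
    Nways (p :: ps) t = Nways ps t + Nways (p :: ps) (t - p) := by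
  rw [Nways_cons p ps t, if_pos hc]

theorem Nways_cons_neg {p : Int} {ps : List Int} {t : Int} (hc : ¬(0 < p ∧ p ≤ t)) :
    Nways (p :: ps) t = Nways ps t := by
  rw [Nways_cons p ps t, if_neg hc]
  ring

theorem countB_nil (hp : ∀ p ∈ ([] : List Int), 2 ≤ p) (t : Int) :
    countB [] hp t = if t = 0 then 1 else 0 := by
  rw [countB]
  by_cases ht : t = 0
  · rw [dif_pos ht, if_pos ht]
  · rw [dif_neg ht, if_neg ht]

theorem countB_cons (p : Int) (rest : List Int) (hp : ∀ q ∈ p :: rest, 2 ≤ q) (t : Int) :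
    countB (p :: rest) hp t =
      if t = 0 then 1
      else if t < p then 0
      else countB (p :: rest) hp (t - p) +
           countB rest (fun q hq => hp q (List.mem_cons_of_mem p hq)) t := by
  rw [countB]
  by_cases ht : t = 0
  · rw [dif_pos ht, if_pos ht]
  · rw [dif_neg ht, if_neg ht]
    by_cases hpt : t < p
    · rw [dif_pos hpt, if_pos hpt]
    · rw [dif_neg hpt, if_neg hpt]

theorem Nways_zero : ∀ ps : List Int, Nways ps 0 = 1 := by
  intro ps
  induction ps with
  | nil => rw [Nways_nil]; rfl
  | cons p ps ih =>
      rw [Nways_cons p ps 0, ih, if_neg (by omega : ¬((0:Int) < p ∧ p ≤ 0))]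
      ring

theorem Nways_eq_zero (t : Int) (ht : t ≠ 0) :
    ∀ ps : List Int, (∀ q ∈ ps, t < q) → Nways ps t = 0 := by
  intro ps
  induction ps with
  | nil => intro _; rw [Nways_nil, if_neg ht]
  | cons p ps ih =>
      intro hall
      have hpt := hall p (List.mem_cons_self ..)
      rw [Nways_cons p ps t, ih (fun q hq => hall q (List.mem_cons_of_mem p hq)),
        if_neg (by omega : ¬((0:Int) < p ∧ p ≤ t))]
      ring

theorem countB_eq_Nways :
    ∀ (tn : Nat) (t : Int), t.toNat = tn →
      ∀ (ps : List Int) (hp : ∀ p ∈ ps, 2 ≤ p), ps.Pairwise (· ≤ ·) →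
        countB ps hp t = Nways ps t := by
  intro tn
  induction tn using Nat.strong_induction_on with
  | _ tn ihN =>
    intro t htn ps
    induction ps with
    | nil =>
        intro hp _
        rw [countB_nil, Nways_nil]
    | cons p rest ih =>
        intro hp hs
        by_cases ht : t = 0
        · subst ht
          rw [Nways_zero, countB_cons, if_pos rfl]
        rw [countB_cons, if_neg ht]
        have h2 : 2 ≤ p := hp p (List.mem_cons_self ..)
        by_cases hpt : t < p
        · rw [if_pos hpt]
          refine (Nways_eq_zero t ht _ ?_).symm
          intro q hq
          rcases List.mem_cons.mp hq with rfl | hq'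
          · exact hpt
          · have := (List.pairwise_cons.mp hs).1 q hq'
            omega
        · rw [if_neg hpt]
          have htake : countB (p :: rest) hp (t - p) = Nways (p :: rest) (t - p) :=
            ihN (t - p).toNat (by omega) (t - p) rfl (p :: rest) hp hs
          have hskip : countB rest (fun q hq => hp q (List.mem_cons_of_mem p hq)) t
              = Nways rest t :=
            ih (fun q hq => hp q (List.mem_cons_of_mem p hq)) (List.pairwise_cons.mp hs).2
          rw [htake, hskip, Nways_cons p rest t,
            if_pos (⟨by omega, by omega⟩ : (0:Int) < p ∧ p ≤ t)]
          ring

theorem Nways_cons_congr (x : Int) (l l' : List Int) (h : ∀ t, Nways l t = Nways l' t) :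
    ∀ (tn : Nat) (t : Int), t.toNat = tn → Nways (x :: l) t = Nways (x :: l') t := by
  intro tn
  induction tn using Nat.strong_induction_on with
  | _ tn ih =>
    intro t htn
    rw [Nways_cons x l t, Nways_cons x l' t, h t]
    by_cases hc : (0 : Int) < x ∧ x ≤ t
    · rw [if_pos hc, if_pos hc, ih (t - x).toNat (by omega) (t - x) rfl]
    · rw [if_neg hc, if_neg hc]

theorem Nways_swap :
    ∀ (tn : Nat) (t : Int), t.toNat = tn →
      ∀ (a b : Int) (l : List Int), Nways (a :: b :: l) t = Nways (b :: a :: l) t := by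
  intro tn
  induction tn using Nat.strong_induction_on with
  | _ tn ih =>
    intro t htn a b l
    by_cases ha : (0 : Int) < a ∧ a ≤ t <;> by_cases hb : (0 : Int) < b ∧ b ≤ t
    · conv_lhs => rw [Nways_cons_pos ha, Nways_cons_pos hb]
      conv_rhs => rw [Nways_cons_pos hb, Nways_cons_pos ha]
      rw [ih (t - a).toNat (by omega) (t - a) rfl a b l,
        (ih (t - b).toNat (by omega) (t - b) rfl a b l).symm]
      by_cases hab : a + b ≤ t
      · rw [Nways_cons_pos (⟨hb.1, by omega⟩ : (0:Int) < b ∧ b ≤ t - a),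
          Nways_cons_pos (⟨ha.1, by omega⟩ : (0:Int) < a ∧ a ≤ t - b)]
        have e : t - a - b = t - b - a := by ring
        rw [e, (ih (t - b - a).toNat (by omega) (t - b - a) rfl a b l).symm]
        ring
      · rw [Nways_cons_neg (by omega : ¬((0:Int) < b ∧ b ≤ t - a)),
          Nways_cons_neg (by omega : ¬((0:Int) < a ∧ a ≤ t - b))]
        ring
    · conv_lhs => rw [Nways_cons_pos ha, Nways_cons_neg hb]
      conv_rhs => rw [Nways_cons_neg hb, Nways_cons_pos ha]
      rw [ih (t - a).toNat (by omega) (t - a) rfl a b l,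
        Nways_cons_neg (by omega : ¬((0:Int) < b ∧ b ≤ t - a))]
    · conv_lhs => rw [Nways_cons_neg ha, Nways_cons_pos hb]
      conv_rhs => rw [Nways_cons_pos hb, Nways_cons_neg ha]
      rw [(ih (t - b).toNat (by omega) (t - b) rfl a b l).symm,
        Nways_cons_neg (by omega : ¬((0:Int) < a ∧ a ≤ t - b))]
    · conv_lhs => rw [Nways_cons_neg ha, Nways_cons_neg hb]
      conv_rhs => rw [Nways_cons_neg hb, Nways_cons_neg ha]

theorem Nways_perm {l l' : List Int} (h : l.Perm l') : ∀ t, Nways l t = Nways l' t := by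
  induction h with
  | nil => intro t; rfl
  | cons x _ ih => intro t; exact Nways_cons_congr x _ _ ih t.toNat t rfl
  | swap a b l => intro t; exact Nways_swap t.toNat t rfl b a l
  | trans _ _ ih1 ih2 => intro t; rw [ih1, ih2]

theorem find?_congr' {α : Type} (l : List α) (p q : α → Bool) (h : ∀ x ∈ l, p x = q x) :
    l.find? p = l.find? q := by
  induction l with
  | nil => rfl
  | cons x xs ih =>
      simp only [List.find?_cons]
      rw [h x (List.mem_cons_self ..)]
      cases q x
      · exact ih (fun y hy => h y (List.mem_cons_of_mem x hy))
      · rfl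

-- sizes are preserved through A's DP folds
theorem size_inner_fold (rng : List Int) (p : Int) :
    ∀ w : Array Int,
      ((rng.foldl (fun w2 i =>
          w2.setIfInBounds i.toNat (w2.getD i.toNat 0 + w2.getD (i - p).toNat 0)) w)).size
        = w.size := by
  induction rng with
  | nil => intro w; rfl
  | cons i rest ih =>
      intro w
      rw [List.foldl_cons, ih, Array.size_setIfInBounds]

theorem size_outer_fold (b : Int) :
    ∀ (ps : List Int) (w : Array Int),
      ((ps.foldl (fun w p =>
          (PySem.List.pyRange p b 1).foldl (fun w2 i =>
            w2.setIfInBounds i.toNat (w2.getD i.toNat 0 + w2.getD (i - p).toNat 0)) w) w)).size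
        = w.size := by
  intro ps
  induction ps with
  | nil => intro w; rfl
  | cons p rest ih =>
      intro w
      rw [List.foldl_cons, ih, size_inner_fold]

-- A's inner loop: sweeping i from a to b−1 with w[i] += w[i−p] turns a table of
-- Nways L into a table of Nways (p :: L)
theorem inner_dp (L : List Int) (p b : Int) (hp2 : 2 ≤ p) :
    ∀ (m : Nat) (a : Int) (w : Array Int), (b - a).toNat = m → p ≤ a →
      w.size = b.toNat →
      (∀ k : Nat, (k : Int) < a → k < b.toNat → w.getD k 0 = Nways (p :: L) (k : Int)) →
      (∀ k : Nat, a ≤ (k : Int) → k < b.toNat → w.getD k 0 = Nways L (k : Int)) →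
      ∀ k : Nat, k < b.toNat →
        ((PySem.List.pyRange a b 1).foldl (fun w2 i =>
            w2.setIfInBounds i.toNat (w2.getD i.toNat 0 + w2.getD (i - p).toNat 0)) w).getD k 0
          = Nways (p :: L) (k : Int) := by
  intro m
  induction m with
  | zero =>
      intro a w hm hpa hlen hlow hhigh k hk
      rw [PySem.List.pyRange_one_eq_nil (by omega)]
      simp only [List.foldl_nil]
      exact hlow k (by omega) hk
  | succ m ihm =>
      intro a w hm hpa hlen hlow hhigh k hk
      have hab : a < b := by omega
      rw [PySem.List.pyRange_one_cons hab, List.foldl_cons]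
      have ha0 : (0 : Int) ≤ a := by omega
      have hanat : a.toNat < b.toNat := by omega
      have hgetA : w.getD a.toNat 0 = Nways L a := by
        have hh := hhigh a.toNat (by omega) hanat
        rw [show ((a.toNat : Nat) : Int) = a by omega] at hh
        exact hh
      have hgetAp : w.getD (a - p).toNat 0 = Nways (p :: L) (a - p) := by
        have hl := hlow (a - p).toNat (by omega) (by omega)
        rw [show (((a - p).toNat : Nat) : Int) = a - p by omega] at hl
        exact hl
      have hset : w.setIfInBounds a.toNat (w.getD a.toNat 0 + w.getD (a - p).toNat 0)
          = w.setIfInBounds a.toNat (Nways (p :: L) a) := by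
        rw [hgetA, hgetAp]
        congr 1
        rw [Nways_cons p L a, if_pos (⟨by omega, hpa⟩ : (0:Int) < p ∧ p ≤ a)]
      rw [hset]
      refine ihm (a + 1) _ (by omega) (by omega) (by rw [Array.size_setIfInBounds, hlen]) ?_ ?_ k hk
      · intro k' hk' hk'b
        rw [arr_getD_eq, Array.getElem?_setIfInBounds]
        by_cases hke : a.toNat = k'
        · rw [if_pos hke, if_pos (by omega : a.toNat < w.size)]
          rw [show ((k' : Nat) : Int) = a by omega]
          rfl
        · rw [if_neg hke, ← arr_getD_eq]
          exact hlow k' (by omega) hk'b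
      · intro k' hk' hk'b
        rw [arr_getD_eq, Array.getElem?_setIfInBounds,
          if_neg (by omega : ¬(a.toNat = k')), ← arr_getD_eq]
        exact hhigh k' (by omega) hk'b

-- A's outer loop over the primes list accumulates Nways (reverse of the processed prefix)
theorem outer_dp (b : Int) (_hb : 1 ≤ b) :
    ∀ (ps : List Int) (L : List Int) (w : Array Int),
      (∀ p ∈ ps, 2 ≤ p) → w.size = b.toNat →
      (∀ k : Nat, k < b.toNat → w.getD k 0 = Nways L (k : Int)) →
      ∀ k : Nat, k < b.toNat →
        ((ps.foldl (fun w p =>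
            (PySem.List.pyRange p b 1).foldl (fun w2 i =>
              w2.setIfInBounds i.toNat
                (w2.getD i.toNat 0 + w2.getD (i - p).toNat 0)) w) w)).getD k 0
          = Nways (ps.reverse ++ L) (k : Int) := by
  intro ps
  induction ps with
  | nil => intro L w _ _ hw k hk; simpa using hw k hk
  | cons p rest ih =>
      intro L w hps hlen hw k hk
      have hp2 : 2 ≤ p := hps p (List.mem_cons_self ..)
      rw [List.foldl_cons]
      have hstep := inner_dp L p b hp2 (b - p).toNat p w rfl le_rfl hlen
        (fun k' hk' hk'b => by
          rw [hw k' hk'b, Nways_cons p L (k' : Int),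
            if_neg (by omega : ¬((0:Int) < p ∧ p ≤ (k' : Int)))]
          ring)
        (fun k' _ hk'b => hw k' hk'b)
      have hlen' : ((PySem.List.pyRange p b 1).foldl (fun w2 i =>
          w2.setIfInBounds i.toNat
            (w2.getD i.toNat 0 + w2.getD (i - p).toNat 0)) w).size = b.toNat := by
        rw [size_inner_fold, hlen]
      have hres := ih (p :: L) _ (fun q hq => hps q (List.mem_cons_of_mem p hq)) hlen' hstep k hk
      rw [hres]
      congr 1
      simp

-- sieve output is (weakly) sorted: it lists indices of a boolean table in order
theorem sieve_sorted (limit : Int) : (sieve_of_eratosthenes limit).Pairwise (· ≤ ·) := by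
  unfold sieve_of_eratosthenes
  rw [List.pairwise_filterMap]
  refine List.Pairwise.imp ?_ (PySem.List.pairwise_lt_enumerate _ _)
  intro q q' hlt x hx y hy
  by_cases h1 : q.2 <;> by_cases h2 : q'.2 <;> simp [h1, h2] at hx hy
  subst hx; subst hy; omega

-- ===== VERDICT (by name: the statement is the Claim_ definition above) =====
theorem count_prime_summations_spec : Claim_equal_count_prime_summations := by
  intro limit _hdom hpre
  unfold Pre_count_prime_summations at hpre
  unfold Spec_count_prime_summations
  unfold count_prime_summations count_prime_summations_alt
  simp only []
  set P := sieve_of_eratosthenes limit with hP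
  set b : Int := limit + 1 with hb
  set w1 : Array Int := (Array.replicate b.toNat (0 : Int)).setIfInBounds 0 1 with hw1def
  set ways2 : Array Int := P.foldl (fun w p =>
      (PySem.List.pyRange p b 1).foldl (fun w2 i =>
        w2.setIfInBounds i.toNat
          (w2.getD i.toNat 0 + w2.getD (i - p).toNat 0)) w) w1 with hways2
  have hw1len : w1.size = b.toNat := by
    rw [hw1def, Array.size_setIfInBounds, Array.size_replicate]
  have hw1 : ∀ k : Nat, k < b.toNat → w1.getD k 0 = Nways [] (k : Int) := by
    intro k hk
    rw [hw1def, arr_getD_eq, Array.getElem?_setIfInBounds, Nways_nil]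
    by_cases hk0 : k = 0
    · subst hk0
      rw [if_pos rfl, if_pos (by rw [Array.size_replicate]; omega),
        if_pos (by norm_num : ((0:Nat):Int) = 0)]
      rfl
    · rw [if_neg (by omega : ¬(0 = k)),
        if_neg (by exact_mod_cast hk0 : ¬((k : Int) = 0))]
      simp [hk]
  have hdp := outer_dp b (by omega) P [] w1 (sieve_ge_two limit) hw1len hw1
  rw [← hways2] at hdp
  have hlen2 : ways2.size = b.toNat := by
    rw [hways2, size_outer_fold, hw1len]
  have hlenInt : PySem.List.len ways2.toList = b := by
    rw [PySem.List.len_eq, Array.length_toList, hlen2]; omega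
  rw [PySem.List.enumerate_eq_map_pyRange ways2.toList 0, hlenInt, List.find?_map, Option.map_map]
  have hcomp : ((fun ic : Int × Int => ic.1) ∘ fun j => (j, PySem.List.pyGetD ways2.toList j 0))
      = fun j : Int => j := rfl
  rw [hcomp]
  have hpred : ∀ i ∈ PySem.List.pyRange 0 b 1,
      ((fun ic : Int × Int => decide (5000 < ic.2)) ∘
          fun j => (j, PySem.List.pyGetD ways2.toList j 0)) i
        = (fun i => decide (5000 < countB P (sieve_ge_two limit) i)) i := by
    intro i hi
    have hi' : 0 ≤ i ∧ i < b := PySem.List.mem_pyRange_one.mp hi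
    simp only [Function.comp]
    have hval : PySem.List.pyGetD ways2.toList i 0 = Nways P.reverse i := by
      rw [PySem.List.pyGetD_eq_getElem ways2.toList 0 hi'.1
        (by rw [Array.length_toList, hlen2]; omega)]
      have hdpi := hdp i.toNat (by omega)
      rw [arr_getD_eq, Array.getElem?_eq_getElem (by omega : i.toNat < ways2.size)] at hdpi
      simp only [Option.getD_some] at hdpi
      rw [Array.getElem_toList (by omega : i.toNat < ways2.size), hdpi, List.append_nil]
      congr 1
      omega
    have hcnt : countB P (sieve_ge_two limit) i = Nways P i :=
      countB_eq_Nways i.toNat i rfl P (sieve_ge_two limit) (sieve_sorted limit)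
    simp only [hval, hcnt, Nways_perm (List.reverse_perm P)]
  rw [find?_congr' _ _ _ hpred]
  rcases hfind : (PySem.List.pyRange 0 b 1).find?
      (fun i => decide (5000 < countB P (sieve_ge_two limit) i)) with _ | v
  · rfl
  · rfl
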